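-- pv_equiv track=rewrite | github.com/aditi14726/DSA_Python | 4213-merge-adjacent-equal-elements/merge-adjacent-equal-elements.py | mergeAdjacent
-- ===== SOURCE A (Python) =====
-- from typing import List
--
-- def mergeAdjacent(nums: List[int]) -> List[int]:
--     stack = []
--
--     for num in nums:
--         stack.append(num)
--
--         while len(stack) >= 2 and stack[-1] == stack[-2]:
--             val = stack.pop()
--             stack[-1] += val
--
--     return stack
-- ===== SOURCE B (Python) =====
-- from typing import List, Optional
--
-- def _merge_first(lst: List[int]) -> Optional[List[int]]:
--     """Return lst with its leftmost adjacent equal pair summed, or None if no such pair."""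
--     for i in range(len(lst) - 1):
--         if lst[i] == lst[i + 1]:
--             return lst[:i] + [lst[i] + lst[i + 1]] + lst[i + 2:]
--     return None
--
-- def mergeAdjacent(nums: List[int]) -> List[int]:
--     res = list(nums)
--     while True:
--         merged = _merge_first(res)
--         if merged is None:
--             return res
--         res = merged
-- ===== Notes on version B (the rewrite author's own statement) =====
-- stated objective: alternative
-- what changed: Replaces the single-pass stack with a rewrite-to-fixpoint loop: repeatedly scan from the left for the first adjacent equal pair, splice in its sum, and restart until no pair remains.
import Mathlib
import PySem

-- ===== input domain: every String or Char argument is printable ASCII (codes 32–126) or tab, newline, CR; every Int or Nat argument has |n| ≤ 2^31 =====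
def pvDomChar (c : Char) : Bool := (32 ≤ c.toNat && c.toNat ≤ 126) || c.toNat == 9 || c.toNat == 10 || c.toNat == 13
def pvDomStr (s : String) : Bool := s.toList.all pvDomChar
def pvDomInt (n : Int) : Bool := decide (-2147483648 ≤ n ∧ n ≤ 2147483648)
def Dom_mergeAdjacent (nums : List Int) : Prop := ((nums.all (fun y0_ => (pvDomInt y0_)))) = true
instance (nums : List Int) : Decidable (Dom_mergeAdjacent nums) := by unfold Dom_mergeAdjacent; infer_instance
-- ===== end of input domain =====

-- B replaces A's single left-to-right stack pass by a leftmost-pair rewrite iterated to a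
-- fixpoint (alternative decomposition, not faster); equal return value proved on all inputs.

-- ===== PORT A =====
-- the Python 'while len(stack) >= 2 and stack[-1] == stack[-2]: val = stack.pop(); stack[-1] += val'
-- (pop on a list of length ≥ 2 is getLast!/dropLast; 'stack[-1] += val' rewrites the new last entry)
def mergeLoopA (stack : List Int) : List Int :=
  if _h : 2 ≤ stack.length ∧ PySem.List.pyGet? stack (-1) = PySem.List.pyGet? stack (-2) then
    -- val := stack.pop(); then stack[-1] += val on the popped stack
    mergeLoopA (stack.dropLast.dropLast ++ [stack.dropLast.getLast! + stack.getLast!])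
  else stack
termination_by stack.length
decreasing_by
  simp only [List.length_append, List.length_dropLast, List.length_cons, List.length_nil]
  omega

def mergeAdjacent (nums : List Int) : List Int :=
  nums.foldl (fun stack num => mergeLoopA (stack ++ [num])) []

-- ===== PORT B =====
-- Source B's _merge_first: the list with its leftmost adjacent equal pair summed, or none
def mergeFirst : List Int → Option (List Int)
  | a :: b :: t => if a = b then some ((a + b) :: t) else (mergeFirst (b :: t)).map (a :: ·)
  | _ => none

theorem mergeFirst_length : ∀ (l l' : List Int), mergeFirst l = some l' → l'.length + 1 = l.length
  | a :: b :: t, l', h => by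
    by_cases hab : a = b
    · simp [mergeFirst, hab] at h; subst h; simp
    · simp only [mergeFirst, hab, if_false, Option.map_eq_some_iff] at h
      obtain ⟨m, hm, rfl⟩ := h
      have := mergeFirst_length (b :: t) m hm
      simp at this ⊢; omega
  | [], _, h => by simp [mergeFirst] at h
  | [a], _, h => by simp [mergeFirst] at h

-- Source B's outer 'while True' loop
def fixMerge (l : List Int) : List Int :=
  match h : mergeFirst l with
  | some l' => fixMerge l'
  | none => l
termination_by l.length
decreasing_by have := mergeFirst_length _ _ h; omega

def mergeAdjacent_alt (nums : List Int) : List Int := fixMerge nums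

-- ===== PRECONDITION & SPEC =====
def Spec_mergeAdjacent (nums : List Int) (out : List Int) : Prop := out = mergeAdjacent_alt nums
instance (nums : List Int) (out : List Int) : Decidable (Spec_mergeAdjacent nums out) := by unfold Spec_mergeAdjacent; infer_instance

-- ===== CLAIM (what is proved, stated in full; the proofs are below) =====
def Claim_equal_mergeAdjacent : Prop := ∀ (nums : List Int), Dom_mergeAdjacent nums → Spec_mergeAdjacent nums (mergeAdjacent nums)

-- ===== LEMMAS AND PROOFS =====

-- the stack invariant: no two adjacent entries are equal
def NoAdj (l : List Int) : Prop := l.IsChain (· ≠ ·)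

theorem mergeFirst_none_of_noAdj : ∀ (l : List Int), NoAdj l → mergeFirst l = none
  | [], _ => rfl
  | [_], _ => rfl
  | a :: b :: t, h => by
    rcases List.isChain_cons_cons.mp h with ⟨hab, ht⟩
    simp [mergeFirst, hab, mergeFirst_none_of_noAdj (b :: t) ht]

theorem fixMerge_noAdj (l : List Int) (h : NoAdj l) : fixMerge l = l := by
  rw [fixMerge]
  split
  · next h' => rw [mergeFirst_none_of_noAdj l h] at h'; exact absurd h' (by simp)
  · rfl

-- leftmost pair of s' ++ [m] ++ m :: rest sits at the junction when s' ++ [m] has no adjacent pair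
theorem mergeFirst_junction : ∀ (s' : List Int) (m : Int) (rest : List Int),
    NoAdj (s' ++ [m]) →
    mergeFirst (s' ++ [m] ++ m :: rest) = some (s' ++ (m + m) :: rest)
  | [], m, rest, _ => by simp [mergeFirst]
  | [a], m, rest, h => by
    rcases List.isChain_cons_cons.mp h with ⟨ham, _⟩
    simp [mergeFirst, ham]
  | a :: b :: s'', m, rest, h => by
    rcases List.isChain_cons_cons.mp h with ⟨hab, ht⟩
    have ih := mergeFirst_junction (b :: s'') m rest ht
    have ih' : mergeFirst (b :: (s'' ++ m :: m :: rest)) = some (b :: (s'' ++ (m + m) :: rest)) := by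
      simpa using ih
    simp [mergeFirst, hab, ih']

theorem noAdj_dropLast (l : List Int) (h : NoAdj l) : NoAdj l.dropLast :=
  h.prefix l.dropLast_prefix

-- unfolding mergeLoopA on a stack whose last two entries differ
theorem mergeLoopA_push_ne (s : List Int) (n : Int)
    (hne : ∀ m, s.getLast? = some m → m ≠ n) :
    mergeLoopA (s ++ [n]) = s ++ [n] := by
  rw [mergeLoopA]
  split
  · next h =>
    exfalso
    rcases h with ⟨hlen, heq⟩
    rcases s.eq_nil_or_concat with rfl | ⟨s', m, rfl⟩
    · simp at hlen
    · simp only [List.concat_eq_append] at hlen heq hne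
      rw [PySem.List.pyGet?_neg_one_append_singleton] at heq
      have h2 : PySem.List.pyGet? (s' ++ [m] ++ [n]) (-2) = some m := by
        rw [PySem.List.pyGet?_neg_ofNat _ 2 (by omega) (by simpa using hlen)]
        simp
      rw [h2] at heq
      exact hne m (by simp) (by simpa using heq.symm)
  · rfl

theorem mergeLoopA_push_eq (s' : List Int) (m : Int) :
    mergeLoopA (s' ++ [m] ++ [m]) = mergeLoopA (s' ++ [m + m]) := by
  rw [mergeLoopA]
  split
  · have h1 : (s' ++ [m] ++ [m]).getLast! = m := by
      simp [List.getLast!_eq_getLast?_getD]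
    have h2 : (s' ++ [m] ++ [m]).dropLast = s' ++ [m] := by simp
    rw [h1, h2]
    have h3 : (s' ++ [m]).dropLast = s' := by simp
    have h4 : (s' ++ [m]).getLast! = m := by simp [List.getLast!_eq_getLast?_getD]
    rw [h3, h4]
  · next h =>
    exfalso
    apply h
    constructor
    · simp
    · rw [PySem.List.pyGet?_neg_one_append_singleton]
      rw [PySem.List.pyGet?_neg_ofNat _ 2 (by omega) (by simp)]
      simp

-- key lemma: one push of A corresponds to fixMerge's leftmost cascade
-- (stated with a fuel bound k on the stack length to get plain structural induction)
theorem fixMerge_push_aux : ∀ (k : Nat) (s : List Int), s.length ≤ k →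
    ∀ (n : Int) (rest : List Int), NoAdj s →
    fixMerge (s ++ n :: rest) = fixMerge (mergeLoopA (s ++ [n]) ++ rest) := by
  intro k
  induction k with
  | zero =>
    intro s hk n rest _
    have : s = [] := List.eq_nil_of_length_eq_zero (by omega)
    subst this
    rw [mergeLoopA_push_ne [] n (by simp)]
    simp
  | succ k ihk =>
  intro s hk n rest hs
  by_cases hlast : ∀ m, s.getLast? = some m → m ≠ n
  · rw [mergeLoopA_push_ne s n hlast]
    simp
  · push_neg at hlast
    obtain ⟨m, hm, rfl⟩ := hlast
    obtain ⟨s', rfl⟩ : ∃ s', s = s' ++ [m] := by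
      rcases s.eq_nil_or_concat with rfl | ⟨s', m', rfl⟩
      · simp at hm
      · simp at hm; subst hm; exact ⟨s', by simp⟩
    rw [mergeLoopA_push_eq s' m]
    have hstep : fixMerge (s' ++ [m] ++ m :: rest) = fixMerge (s' ++ (m + m) :: rest) := by
      rw [fixMerge]
      split
      · next l' h' => rw [mergeFirst_junction s' m rest hs] at h'; cases h'; rfl
      · next h' => rw [mergeFirst_junction s' m rest hs] at h'; cases h'
    rw [hstep]
    have hs' : NoAdj s' := by
      have := noAdj_dropLast _ hs; simpa using this
    have hk' : s'.length ≤ k := by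
      have : (s' ++ [m]).length = s'.length + 1 := by simp
      omega
    exact ihk s' hk' (m + m) rest hs'

theorem fixMerge_push (s : List Int) (n : Int) (rest : List Int) (hs : NoAdj s) :
    fixMerge (s ++ n :: rest) = fixMerge (mergeLoopA (s ++ [n]) ++ rest) :=
  fixMerge_push_aux s.length s le_rfl n rest hs

theorem mergeLoopA_noAdj_aux : ∀ (k : Nat) (s : List Int), s.length ≤ k →
    ∀ (n : Int), NoAdj s → NoAdj (mergeLoopA (s ++ [n])) := by
  intro k
  induction k with
  | zero =>
    intro s hk n _
    have : s = [] := List.eq_nil_of_length_eq_zero (by omega)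
    subst this
    rw [mergeLoopA_push_ne [] n (by simp)]
    simp [NoAdj]
  | succ k ihk =>
  intro s hk n hs
  by_cases hlast : ∀ m, s.getLast? = some m → m ≠ n
  · rw [mergeLoopA_push_ne s n hlast]
    rcases s.eq_nil_or_concat with rfl | ⟨s', m, rfl⟩
    · simp [NoAdj]
    · simp only [List.concat_eq_append] at hs hlast ⊢
      have hm : m ≠ n := hlast m (by simp)
      refine List.IsChain.append hs (List.IsChain.singleton _) ?_
      intro x hx y hy
      simp at hx hy
      omega
  · push_neg at hlast
    obtain ⟨m, hm, rfl⟩ := hlast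
    obtain ⟨s', rfl⟩ : ∃ s', s = s' ++ [m] := by
      rcases s.eq_nil_or_concat with rfl | ⟨s', m', rfl⟩
      · simp at hm
      · simp at hm; subst hm; exact ⟨s', by simp⟩
    rw [mergeLoopA_push_eq s' m]
    have hs' : NoAdj s' := by
      have := noAdj_dropLast _ hs; simpa using this
    have hk' : s'.length ≤ k := by
      have : (s' ++ [m]).length = s'.length + 1 := by simp
      omega
    exact ihk s' hk' (m + m) hs'

theorem mergeLoopA_noAdj (s : List Int) (n : Int) (hs : NoAdj s) :
    NoAdj (mergeLoopA (s ++ [n])) :=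
  mergeLoopA_noAdj_aux s.length s le_rfl n hs

theorem fixMerge_foldl : ∀ (rest s : List Int), NoAdj s →
    fixMerge (s ++ rest) = rest.foldl (fun stack num => mergeLoopA (stack ++ [num])) s := by
  intro rest
  induction rest with
  | nil => intro s hs; simpa using fixMerge_noAdj s hs
  | cons n rest ih =>
    intro s hs
    rw [List.foldl_cons, ← ih (mergeLoopA (s ++ [n])) (mergeLoopA_noAdj s n hs)]
    exact fixMerge_push s n rest hs

-- ===== VERDICT (by name: the statement is the Claim_ definition above) =====
theorem mergeAdjacent_spec : Claim_equal_mergeAdjacent := by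
  intro nums _
  unfold Spec_mergeAdjacent mergeAdjacent mergeAdjacent_alt
  have := fixMerge_foldl nums [] (by simp [NoAdj])
  simpa using this.symm
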